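-- pv_equiv track=rewrite | github.com/guido-giordano/19-arabidopsis-founders-proteome | src/arat_orthologyframework.py | resolve_accession
-- ===== SOURCE A (Python) =====
-- def resolve_accession(species_col, accession_keys):
--     matches = [acc for acc in accession_keys if acc in species_col]
--
--     if len(matches) == 1:
--         return matches[0]
--
--     if len(matches) > 1:
--         matches = sorted(matches, key=len, reverse=True)
--         return matches[0]
--
--     return None
-- ===== SOURCE B (Python) =====
-- def resolve_accession(species_col, accession_keys):
--     best = None
--     best_len = -1
--     for acc in accession_keys:
--         if acc in species_col:
--             if len(acc) > best_len:
--                 best, best_len = acc, len(acc)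
--     return best
-- ===== Notes on version B (the rewrite author's own statement) =====
-- stated objective: simpler
-- what changed: Drops the intermediate matches list and the stable descending sort; a single pass keeps the first matching key of maximal length (strict > preserves the sort's tie-breaking).
import Mathlib
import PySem

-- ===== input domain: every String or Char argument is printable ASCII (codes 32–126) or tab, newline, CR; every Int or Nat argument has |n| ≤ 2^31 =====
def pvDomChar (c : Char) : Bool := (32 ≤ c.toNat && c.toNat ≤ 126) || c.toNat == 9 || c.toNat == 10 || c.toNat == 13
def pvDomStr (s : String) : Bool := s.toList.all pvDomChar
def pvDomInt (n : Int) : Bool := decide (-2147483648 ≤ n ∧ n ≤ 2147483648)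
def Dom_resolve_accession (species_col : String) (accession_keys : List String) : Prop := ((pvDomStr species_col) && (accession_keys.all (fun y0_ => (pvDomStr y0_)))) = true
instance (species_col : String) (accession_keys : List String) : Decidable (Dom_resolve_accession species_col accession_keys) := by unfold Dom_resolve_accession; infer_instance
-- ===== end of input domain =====

-- B replaces A's filtered list + stable descending sort with a single pass keeping the
-- first matching key of maximal length (objective: simpler).


-- ===== PORT A =====
def resolve_accession (species_col : String) (accession_keys : List String) : Option String :=
  let matches_ := accession_keys.filter (fun acc => PySem.Str.isIn acc species_col)
  if matches_.length = 1 then matches_.head?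
  else if 1 < matches_.length then
    (PySem.List.sorted matches_ (fun s => PySem.Str.len s) true).head?
  else none

-- ===== PORT B =====
def resolve_accession_alt (species_col : String) (accession_keys : List String) : Option String :=
  (accession_keys.foldl
    (fun (st : Option String × Int) acc =>
      if PySem.Str.isIn acc species_col then
        if PySem.Str.len acc > st.2 then (some acc, PySem.Str.len acc) else st
      else st)
    (none, -1)).1

-- ===== PRECONDITION & SPEC =====
def Spec_resolve_accession (species_col : String) (accession_keys : List String) (out : Option String) : Prop := out = resolve_accession_alt species_col accession_keys
instance (species_col : String) (accession_keys : List String) (out : Option String) : Decidable (Spec_resolve_accession species_col accession_keys out) := by unfold Spec_resolve_accession; infer_instance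

-- ===== CLAIM (what is proved, stated in full; the proofs are below) =====
def Claim_equal_resolve_accession : Prop := ∀ (species_col : String) (accession_keys : List String), Dom_resolve_accession species_col accession_keys → Spec_resolve_accession species_col accession_keys (resolve_accession species_col accession_keys)

-- ===== LEMMAS AND PROOFS =====

-- the single step of B's fold, after the membership filter
def pvStep (st : Option String × Int) (acc : String) : Option String × Int :=
  if PySem.Str.len acc > st.2 then (some acc, PySem.Str.len acc) else st

-- the insertBy step that PySem.List.sorted with reverse = true performs (foldl argument order)
def pvIns (ys : List String) (x : String) : List String :=
  PySem.List.insertBy (fun a b => decide (PySem.Str.len b < PySem.Str.len a)) x ys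

lemma pvLen_nonneg (s : String) : 0 ≤ PySem.Str.len s := by
  simp [PySem.Str.len_eq]

-- invariant: B's state is (head of the reverse-sorted list so far, its length), (none, -1) when empty
lemma pvRel_step (st : Option String × Int) (acc : List String) (x : String)
    (h : (acc = [] ∧ st = (none, -1)) ∨ ∃ h' t, acc = h' :: t ∧ st = (some h', PySem.Str.len h')) :
    (pvIns acc x = [] ∧ pvStep st x = (none, -1)) ∨
      ∃ h' t, pvIns acc x = h' :: t ∧ pvStep st x = (some h', PySem.Str.len h') := by
  rcases h with ⟨hacc, hst⟩ | ⟨h', t, hacc, hst⟩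
  · subst hacc; subst hst
    right
    refine ⟨x, [], ?_, ?_⟩
    · simp [pvIns, PySem.List.insertBy]
    · have hx := pvLen_nonneg x
      simp only [pvStep]
      rw [if_pos (by omega)]
  · subst hacc; subst hst
    right
    by_cases hlt : h'.length < x.length
    · refine ⟨x, h' :: t, ?_, ?_⟩
      · simp [pvIns, PySem.List.insertBy, hlt]
      · simp [pvStep, PySem.Str.len_eq, hlt]
    · refine ⟨h', PySem.List.insertBy (fun a b => decide (PySem.Str.len b < PySem.Str.len a)) x t, ?_, ?_⟩
      · simp [pvIns, PySem.List.insertBy, hlt]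
      · simp [pvStep, PySem.Str.len_eq, hlt]

lemma pvRel_foldl (m : List String) (st : Option String × Int) (acc : List String)
    (h : (acc = [] ∧ st = (none, -1)) ∨ ∃ h' t, acc = h' :: t ∧ st = (some h', PySem.Str.len h')) :
    (m.foldl pvIns acc = [] ∧ m.foldl pvStep st = (none, -1)) ∨
      ∃ h' t, m.foldl pvIns acc = h' :: t ∧ m.foldl pvStep st = (some h', PySem.Str.len h') := by
  induction m generalizing st acc with
  | nil => simpa using h
  | cons x xs ih =>
    simp only [List.foldl_cons]
    exact ih _ _ (pvRel_step st acc x h)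

-- ===== VERDICT (by name: the statement is the Claim_ definition above) =====
lemma pvSorted_eq (m : List String) :
    PySem.List.sorted m (fun s => PySem.Str.len s) true = m.foldl pvIns [] :=
  PySem.List.sorted_rev_eq_foldl_insertBy m _

lemma pvAlt_eq (species_col : String) (accession_keys : List String) :
    resolve_accession_alt species_col accession_keys =
      ((accession_keys.filter (fun acc => PySem.Str.isIn acc species_col)).foldl pvStep (none, -1)).1 := by
  unfold resolve_accession_alt
  rw [← PySem.List.foldl_if_eq_foldl_filter]
  rfl

-- ===== VERDICT (by name: the statement is the Claim_ definition above) =====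
theorem resolve_accession_spec : Claim_equal_resolve_accession := by
  intro species_col accession_keys _
  unfold Spec_resolve_accession resolve_accession
  rw [pvAlt_eq]
  set m := accession_keys.filter (fun acc => PySem.Str.isIn acc species_col) with hm
  rcases pvRel_foldl m ((none : Option String), (-1 : Int)) [] (Or.inl ⟨rfl, rfl⟩) with
    ⟨hnil, hst⟩ | ⟨h, t, hsort, hst⟩
  · have hmnil : m = [] := by
      have := (PySem.List.sorted_eq_nil_iff m (fun s => PySem.Str.len s) true).mp
        (by rw [pvSorted_eq]; exact hnil)
      exact this
    rw [hst]
    simp [hmnil]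
  · have hsorted : PySem.List.sorted m (fun s => PySem.Str.len s) true = h :: t := by
      rw [pvSorted_eq]; exact hsort
    have hmne : m ≠ [] := by
      intro hmnil
      rw [hmnil] at hsorted
      simp [PySem.List.sorted] at hsorted
    rw [hst]
    by_cases h1 : m.length = 1
    · rcases m with _ | ⟨x, _ | ⟨y, ys⟩⟩
      · exact absurd rfl hmne
      · have : h = x := by
          have : PySem.List.sorted [x] (fun s => PySem.Str.len s) true = [x] := by
            simp [PySem.List.sorted, PySem.List.insertBy]
          rw [this] at hsorted
          exact (List.cons_eq_cons.mp hsorted.symm).1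
        simp [h1, this]
      · simp at h1
    · have h2 : 1 < m.length := by
        have h0 : m.length ≠ 0 := fun hh => hmne (List.length_eq_zero_iff.mp hh)
        omega
      have hsorted' : PySem.List.sorted m (fun s : String => (s.length : Int)) true = h :: t := by
        simpa [PySem.Str.len_eq] using hsorted
      simp [h1, h2, hsorted']
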